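-- pv_equiv track=rewrite | github.com/jackichh/homework | 4.4.2.py | detect_center
-- ===== SOURCE A (Python) =====
-- def detect_center(x, y):
--     cx, cy = 0, 0
--     ax, ay = 0, 0
--     for i in range(3):
--         if -225 + i * 150 <= x <= -75 + i * 150:
--             cx, ax = ((-225 + i * 150) + (-75 + i * 150)) // 2, i
--         if -225 + i * 150 <= y <= -75 + i * 150:
--             cy, ay = ((-225 + i * 150) + (-75 + i * 150)) // 2, 2 - i
--     return (cx, cy), (ax, ay)
-- ===== SOURCE B (Python) =====
-- def detect_center(x, y):
--     def cell(v):
--         # closed-form band index on [-225, 225]; None means out of range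
--         if -225 <= v <= 225:
--             i = (v + 225) // 150
--             if i == 3:
--                 i = 2
--             return -150 + 150 * i, i
--         return 0, None
--     cx, ix = cell(x)
--     cy, iy = cell(y)
--     return (cx, cy), (ix if ix is not None else 0, 2 - iy if iy is not None else 0)
-- ===== Notes on version B (the rewrite author's own statement) =====
-- stated objective: idiomatic
-- what changed: Replaced A's scan over the three bands (loop over i in range(3) with two range tests per iteration) by a per-axis closed-form band index idx=(v+225)//150 (clamping 3 to 2), computed once per axis.
import Mathlib
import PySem

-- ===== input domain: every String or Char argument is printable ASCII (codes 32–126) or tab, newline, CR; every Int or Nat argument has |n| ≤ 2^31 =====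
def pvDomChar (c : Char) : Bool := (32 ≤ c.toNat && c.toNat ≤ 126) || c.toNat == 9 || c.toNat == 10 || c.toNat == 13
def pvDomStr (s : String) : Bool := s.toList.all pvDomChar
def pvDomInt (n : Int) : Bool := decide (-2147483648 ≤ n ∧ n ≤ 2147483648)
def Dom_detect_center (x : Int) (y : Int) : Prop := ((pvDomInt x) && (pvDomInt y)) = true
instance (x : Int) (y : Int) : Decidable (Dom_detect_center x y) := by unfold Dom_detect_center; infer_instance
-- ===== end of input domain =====

-- B replaces A's scan over the three bands by a per-axis closed-form band index (more idiomatic).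

-- ===== PORT A =====
-- literal transliteration of A: loop i in range(3), updating (cx,ax) / (cy,ay) in place
def detect_center (x : Int) (y : Int) : (Int × Int) × (Int × Int) :=
  let s := (PySem.List.pyRange 0 3 1).foldl
    (fun (st : (Int × Int) × (Int × Int)) (i : Int) =>
      let cx := st.1.1; let cy := st.1.2; let ax := st.2.1; let ay := st.2.2
      let p1 : Int × Int :=
        if -225 + i * 150 ≤ x ∧ x ≤ -75 + i * 150 then
          (PySem.Int.floordiv ((-225 + i * 150) + (-75 + i * 150)) 2, i)
        else (cx, ax)
      let p2 : Int × Int :=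
        if -225 + i * 150 ≤ y ∧ y ≤ -75 + i * 150 then
          (PySem.Int.floordiv ((-225 + i * 150) + (-75 + i * 150)) 2, 2 - i)
        else (cy, ay)
      ((p1.1, p2.1), (p1.2, p2.2)))
    ((0, 0), (0, 0))
  s

-- ===== PORT B =====
-- per-axis helper: closed-form band index on [-225,225]; none means out of range
def pvCell (v : Int) : Int × Option Int :=
  if -225 ≤ v ∧ v ≤ 225 then
    let i := PySem.Int.floordiv (v + 225) 150
    let i := if i = 3 then 2 else i
    (-150 + 150 * i, some i)
  else (0, none)

def detect_center_alt (x : Int) (y : Int) : (Int × Int) × (Int × Int) :=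
  let px := pvCell x
  let py := pvCell y
  ((px.1, py.1),
   (match px.2 with | some i => i | none => 0,
    match py.2 with | some i => 2 - i | none => 0))

-- ===== PRECONDITION & SPEC =====
def Spec_detect_center (x : Int) (y : Int) (out : (Int × Int) × (Int × Int)) : Prop := out = detect_center_alt x y
instance (x : Int) (y : Int) (out : (Int × Int) × (Int × Int)) : Decidable (Spec_detect_center x y out) := by unfold Spec_detect_center; infer_instance

-- ===== CLAIM (what is proved, stated in full; the proofs are below) =====
def Claim_equal_detect_center : Prop := ∀ (x : Int) (y : Int), Dom_detect_center x y → Spec_detect_center x y (detect_center x y)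

-- ===== LEMMAS AND PROOFS =====

theorem pvCell_eq (v : Int) :
    pvCell v =
      if -225 ≤ v ∧ v ≤ 225 then
        let i := (v + 225) / 150
        let i := if i = 3 then 2 else i
        (-150 + 150 * i, some i)
      else (0, none) := by
  unfold pvCell
  rw [PySem.Int.floordiv_eq_ediv_of_pos (by norm_num)]

-- ===== VERDICT (by name: the statement is the Claim_ definition above) =====
theorem detect_center_spec : Claim_equal_detect_center := by
  intro x y _
  show detect_center x y = detect_center_alt x y
  have hx := pvCell_eq x
  have hy := pvCell_eq y
  have hr : PySem.List.pyRange 0 3 1 = [0, 1, 2] := by decide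
  unfold detect_center detect_center_alt
  rw [hr, hx, hy]
  simp only [List.foldl]
  split_ifs <;> (first | (simp only [Prod.mk.injEq]; omega) | (simp; omega) | simp)
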